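-- pv_equiv track=rewrite | github.com/Janitor42/Worki | nik.py | pary
-- ===== SOURCE A (Python) =====
-- def pary(a):
--     b = []
--     counter_par = 0
--     for elem in a:
--         if elem not in b:
--             b.append(elem)
--         else:
--             for elem2 in b:
--                 if elem2 == elem:
--                     counter_par += 1
--             b.append(elem)
--     return (counter_par)
-- ===== SOURCE B (Python) =====
-- def pary(a):
--     s = sorted(a)
--     total = 0
--     while s:
--         x = s[0]
--         k = 0
--         while s and s[0] == x:
--             k += 1
--             s = s[1:]
--         total += k * (k - 1) // 2
--     return total
-- ===== Notes on version B (the rewrite author's own statement) =====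
-- stated objective: faster
-- what changed: Sorts the list and sums the closed form k*(k-1)//2 over each run of equal values, instead of accumulating the number of prior occurrences element by element with inner scans.
import Mathlib
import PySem

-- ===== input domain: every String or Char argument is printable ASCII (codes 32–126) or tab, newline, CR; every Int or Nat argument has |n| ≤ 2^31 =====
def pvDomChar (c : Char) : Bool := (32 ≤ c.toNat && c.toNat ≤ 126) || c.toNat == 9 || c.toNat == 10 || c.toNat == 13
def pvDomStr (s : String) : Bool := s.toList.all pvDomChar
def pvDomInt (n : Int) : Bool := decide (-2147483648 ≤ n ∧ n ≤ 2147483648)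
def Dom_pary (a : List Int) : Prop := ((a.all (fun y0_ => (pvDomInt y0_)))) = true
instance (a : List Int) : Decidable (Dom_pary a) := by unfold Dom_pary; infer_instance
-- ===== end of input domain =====

-- B sorts the list and sums the closed form k*(k-1)//2 over each run of equal values (O(n log n)) instead of A's per-element prior-occurrence scans; same return value.

-- ===== PORT A =====
-- loop over a carrying (b, counter_par); the inner 'for elem2 in b' is the foldl over b
def paryLoopA : List Int → List Int → Int → Int
  | [], _, c => c
  | x :: xs, b, c =>
    if ¬ (x ∈ b) then paryLoopA xs (b ++ [x]) c
    else paryLoopA xs (b ++ [x]) (b.foldl (fun acc e2 => if e2 == x then acc + 1 else acc) c)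

def pary (a : List Int) : Int := paryLoopA a [] 0

-- ===== PORT B =====
-- outer 'while s': one step consumes the leading run of elements equal to s[0]
-- (the inner 'while s and s[0] == x' is the takeWhile/dropWhile split) and adds k*(k-1)//2
def paryLoopB : List Int → Int → Int
  | [], total => total
  | x :: xs, total =>
    let run := (x :: xs).takeWhile (fun y => y == x)
    let k : Int := run.length
    paryLoopB ((x :: xs).dropWhile (fun y => y == x)) (total + PySem.Int.floordiv (k * (k - 1)) 2)
termination_by s _ => s.length
decreasing_by
  simp only [List.dropWhile_cons, beq_self_eq_true, if_true]
  exact Nat.lt_succ_of_le (List.length_dropWhile_le _ _)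

def pary_alt (a : List Int) : Int := paryLoopB (PySem.List.sorted a (fun x => x) false) 0

-- ===== PRECONDITION & SPEC =====
def Spec_pary (a : List Int) (out : Int) : Prop := out = pary_alt a
instance (a : List Int) (out : Int) : Decidable (Spec_pary a out) := by unfold Spec_pary; infer_instance

-- ===== CLAIM (what is proved, stated in full; the proofs are below) =====
def Claim_equal_pary : Prop := ∀ (a : List Int), Dom_pary a → Spec_pary a (pary a)

-- ===== LEMMAS AND PROOFS =====

-- number of ordered pairs i < j with a_i = a_j, counted as 'later duplicates of the head'
def pairsCnt : List Int → Int
  | [] => 0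
  | x :: xs => (xs.count x : Int) + pairsCnt xs

theorem count_single_ite (x y : Int) : (List.count y [x] : Int) = if y = x then 1 else 0 := by
  by_cases h : y = x
  · subst h; simp
  · simp [List.count_eq_zero_of_not_mem (show y ∉ [x] by simp [h]), h]

theorem sum_ite_eq_count (x : Int) (zs : List Int) :
    (zs.map (fun i => (if i = x then (1 : Int) else 0))).sum = (zs.count x : Int) := by
  induction zs with
  | nil => simp
  | cons z t ih =>
    simp only [List.map_cons, List.sum_cons, ih, List.count_cons]
    by_cases h : z = x
    · simp [h]; ring
    · simp [h]

theorem paryLoopA_eq (a : List Int) :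
    ∀ (b : List Int) (c : Int),
      paryLoopA a b c = c + pairsCnt a + (a.map (fun x => (b.count x : Int))).sum := by
  induction a with
  | nil => intro b c; simp [paryLoopA, pairsCnt]
  | cons x xs ih =>
    intro b c
    have hsum : ((xs.map (fun y => ((b ++ [x]).count y : Int))).sum)
        = (xs.map (fun y => (b.count y : Int))).sum + (xs.count x : Int) := by
      have h1 : (fun y => (((b ++ [x]).count y : Int)))
          = fun y => ((b.count y : Int) + (if y = x then (1 : Int) else 0)) := by
        funext y; rw [List.count_append]; push_cast; rw [count_single_ite]
      rw [h1, PySem.List.sum_map_add_int, sum_ite_eq_count]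
    by_cases hmem : x ∈ b
    · simp only [paryLoopA, hmem, not_true, if_false]
      rw [PySem.List.foldl_beq_add_one, ih (b ++ [x]), hsum]
      simp only [pairsCnt, List.map_cons, List.sum_cons]
      ring
    · simp only [paryLoopA, hmem, not_false_iff, if_true]
      rw [ih (b ++ [x]), hsum]
      have h0 : (b.count x : Int) = 0 := by
        simp [List.count_eq_zero_of_not_mem hmem]
      simp only [pairsCnt, List.map_cons, List.sum_cons, h0]
      ring

theorem pary_eq_pairsCnt (a : List Int) : pary a = pairsCnt a := by
  unfold pary
  rw [paryLoopA_eq]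
  simp

theorem pairsCnt_perm {l l' : List Int} (h : l.Perm l') : pairsCnt l = pairsCnt l' := by
  induction h with
  | nil => rfl
  | cons x h ih => simp [pairsCnt, ih, h.count_eq]
  | swap x y l =>
    simp only [pairsCnt, List.count_cons]
    by_cases h : x = y
    · subst h; push_cast; ring
    · have h1 : (x == y) = false := by simp [h]
      have h2 : (y == x) = false := by simp [Ne.symm h]
      simp only [h1, h2]
      push_cast; ring
  | trans _ _ ih1 ih2 => rw [ih1, ih2]

-- a leading block of K copies of x followed by a list without x contributes K*(K-1)/2 (doubled form)
theorem two_mul_pairsCnt_replicate (x : Int) (rest : List Int) (hrest : rest.count x = 0) :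
    ∀ K : Nat, 2 * pairsCnt (List.replicate K x ++ rest) = (K : Int) * ((K : Int) - 1) + 2 * pairsCnt rest := by
  intro K
  induction K with
  | zero => simp
  | succ n ih =>
    have h : List.replicate (n + 1) x ++ rest = x :: (List.replicate n x ++ rest) := by
      simp [List.replicate_succ]
    rw [h]
    simp only [pairsCnt, List.count_append, List.count_replicate, hrest, beq_self_eq_true, if_true]
    rw [mul_add, ih]
    push_cast
    ring

-- head of dropWhile fails the predicate
theorem dropWhile_head_beq_false (x : Int) :
    ∀ (l : List Int) (y : Int) (ys : List Int),
      l.dropWhile (fun v => v == x) = y :: ys → (y == x) = false := by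
  intro l
  induction l with
  | nil => intro y ys h; simp [List.dropWhile] at h
  | cons a t iha =>
    intro y ys h
    by_cases hax : (a == x) = true
    · rw [List.dropWhile_cons, if_pos hax] at h
      exact iha _ _ h
    · rw [List.dropWhile_cons, if_neg hax] at h
      have hya : y = a := (List.cons_eq_cons.1 h).1.symm
      subst hya
      exact Bool.not_eq_true _ ▸ (by simpa using hax)

theorem paryLoopB_eq_aux (n : Nat) :
    ∀ (s : List Int), s.length ≤ n → s.Pairwise (· ≤ ·) → ∀ t, paryLoopB s t = t + pairsCnt s := by
  induction n with
  | zero =>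
    intro s hlen _ t
    have : s = [] := List.length_eq_zero_iff.1 (Nat.le_zero.1 hlen)
    subst this
    simp [paryLoopB, pairsCnt]
  | succ n ih =>
    intro s hlen hp t
    cases s with
    | nil => simp [paryLoopB, pairsCnt]
    | cons x xs =>
      set run := (x :: xs).takeWhile (fun y => y == x) with hrun
      set rest := (x :: xs).dropWhile (fun y => y == x) with hrest
      have hsplit : run ++ rest = x :: xs := List.takeWhile_append_dropWhile
      have hrest2 : rest = xs.dropWhile (fun y => y == x) := by
        rw [hrest, List.dropWhile_cons]; simp
      have hlen' : rest.length ≤ n := by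
        rw [hrest2]
        have := List.length_dropWhile_le (fun y => y == x) xs
        simp only [List.length_cons] at hlen
        omega
      have hrun_rep : run = List.replicate run.length x := by
        rw [List.eq_replicate_iff]
        refine ⟨rfl, fun b hb => ?_⟩
        have := List.mem_takeWhile_imp hb
        simpa [beq_iff_eq] using this
      -- rest contains no x
      have hx_not : x ∉ rest := by
        intro hxmem
        have hrest_sub : rest.Sublist (x :: xs) := by
          rw [← hsplit]; exact List.sublist_append_right _ _
        have hrest_pw : rest.Pairwise (· ≤ ·) := hp.sublist hrest_sub
        cases hrest' : rest with
        | nil => rw [hrest'] at hxmem; exact absurd hxmem (List.not_mem_nil)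
        | cons y ys =>
          have hy_false : (y == x) = false :=
            dropWhile_head_beq_false x (x :: xs) y ys (by rw [← hrest, hrest'])
          have hy_ne : y ≠ x := by simpa using hy_false
          have hy_mem : y ∈ x :: xs := by rw [← hsplit, hrest']; simp
          have hxy : x ≤ y := by
            rcases List.mem_cons.1 hy_mem with h | h
            · exact le_of_eq h.symm
            · exact (List.pairwise_cons.1 hp).1 y h
          have hxlt : x < y := lt_of_le_of_ne hxy (Ne.symm hy_ne)
          rw [hrest'] at hxmem
          rcases List.mem_cons.1 hxmem with h | h
          · exact hy_ne h.symm
          · have hle : y ≤ x := by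
              have := hrest_pw
              rw [hrest'] at this
              exact (List.pairwise_cons.1 this).1 x h
            exact absurd hle (not_le.mpr hxlt)
      have hcnt : rest.count x = 0 := List.count_eq_zero_of_not_mem hx_not
      have hrest_pw : rest.Pairwise (· ≤ ·) :=
        hp.sublist (by rw [← hsplit]; exact List.sublist_append_right _ _)
      have h2 : 2 * pairsCnt (x :: xs)
          = (run.length : Int) * ((run.length : Int) - 1) + 2 * pairsCnt rest := by
        conv_lhs => rw [← hsplit, hrun_rep]
        rw [two_mul_pairsCnt_replicate x rest hcnt run.length]
      have hfd : PySem.Int.floordiv ((run.length : Int) * ((run.length : Int) - 1)) 2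
          = pairsCnt (x :: xs) - pairsCnt rest := by
        have heven : (run.length : Int) * ((run.length : Int) - 1)
            = 2 * (pairsCnt (x :: xs) - pairsCnt rest) := by linarith
        rw [heven, PySem.Int.floordiv_eq_ediv_of_pos (by norm_num)]
        exact Int.mul_ediv_cancel_left _ (by norm_num)
      show paryLoopB (x :: xs) t = t + pairsCnt (x :: xs)
      rw [paryLoopB]
      simp only [← hrun, ← hrest]
      rw [ih rest hlen' hrest_pw, hfd]
      ring

-- ===== VERDICT (by name: the statement is the Claim_ definition above) =====
theorem pary_spec : Claim_equal_pary := by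
  intro a _
  unfold Spec_pary
  rw [pary_eq_pairsCnt]
  unfold pary_alt
  rw [paryLoopB_eq_aux ((PySem.List.sorted a (fun x => x) false).length) _ le_rfl
      (by simpa using PySem.List.sorted_pairwise (xs := a) (key := fun x => x)),
    pairsCnt_perm (PySem.List.sorted_perm (xs := a) (key := fun x => x) (rev := false))]
  ring
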